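-- pv_equiv track=rewrite | github.com/tresoldi/freqprob | scripts/benchmarks.py | create_uniform_distribution
-- ===== SOURCE A (Python) =====
-- def create_uniform_distribution(vocab_size: int, total_count: int) -> dict[str, int]:
--     """Create a uniform frequency distribution."""
--     count_per_word = total_count // vocab_size
--     remainder = total_count % vocab_size
--
--     words = [f"word_{i:06d}" for i in range(vocab_size)]
--     frequencies = [count_per_word] * vocab_size
--
--     # Distribute remainder
--     for i in range(remainder):
--         frequencies[i] += 1
--
--     return dict(zip(words, frequencies, strict=False))
-- ===== SOURCE B (Python) =====
-- def create_uniform_distribution(vocab_size: int, total_count: int) -> dict[str, int]: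
--     """Create a uniform frequency distribution."""
--     # entry i gets ceil((total_count - i) / vocab_size): the closed form of
--     # "floor share plus one extra unit while the remainder lasts"
--     return {f"word_{i:06d}": -((i - total_count) // vocab_size) for i in range(vocab_size)}
-- ===== Notes on version B (the rewrite author's own statement) =====
-- stated objective: simpler
-- what changed: A's three-step build (uniform frequency list, a second loop mutating the first `remainder` slots, then zip into a dict) is replaced by one comprehension that computes each word's share directly with the closed-form ceiling division -((i - total_count) // vocab_size), so the remainder variable, the mutation loop and the intermediate parallel lists disappear.
import Mathlib
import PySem

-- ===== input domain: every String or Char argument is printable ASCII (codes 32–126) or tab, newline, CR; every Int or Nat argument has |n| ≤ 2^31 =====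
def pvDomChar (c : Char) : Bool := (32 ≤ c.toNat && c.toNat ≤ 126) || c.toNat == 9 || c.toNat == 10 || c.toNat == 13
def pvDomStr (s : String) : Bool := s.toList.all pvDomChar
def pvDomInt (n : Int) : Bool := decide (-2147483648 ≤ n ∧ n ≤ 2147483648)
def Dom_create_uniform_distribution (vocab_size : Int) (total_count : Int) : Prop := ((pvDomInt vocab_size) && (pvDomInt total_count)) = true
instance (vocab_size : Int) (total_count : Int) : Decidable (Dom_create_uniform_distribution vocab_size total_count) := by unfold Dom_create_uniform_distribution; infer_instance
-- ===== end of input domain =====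

-- B replaces A's three-step build (uniform list, remainder-mutation loop, zip) by a single
-- comprehension assigning each key the closed-form ceiling share -((i - total_count) // vocab_size).

-- f"word_{i:06d}" for i ≥ 0 (the only i that occur: i ranges over range(vocab_size));
-- exact there: 06d pads str(i) with leading zeros to width 6, which is zfill.
def pvWord (i : Int) : String :=
  String.ofList ('w' :: 'o' :: 'r' :: 'd' :: '_' :: PySem.Chars.zfill (PySem.Int.toChars i) 6)

-- ===== PORT A =====
def create_uniform_distribution (vocab_size : Int) (total_count : Int) : List (String × Int) :=
  let count_per_word := PySem.Int.floordiv total_count vocab_size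
  let remainder := PySem.Int.mod total_count vocab_size
  let words := (PySem.List.pyRange 0 vocab_size 1).map pvWord
  let frequencies := PySem.List.pyRepeat [count_per_word] vocab_size
  -- for i in range(remainder): frequencies[i] += 1   (i is always a valid index: 0 ≤ i < remainder < vocab_size)
  let frequencies := (PySem.List.pyRange 0 remainder 1).foldl
      (fun fs i => fs.set i.toNat (PySem.List.pyGetD fs i 0 + 1)) frequencies
  -- dict(zip(words, frequencies)): the words are pairwise distinct, so the dict is exactly the zipped pairs
  words.zip frequencies

-- ===== PORT B =====
def create_uniform_distribution_alt (vocab_size : Int) (total_count : Int) : List (String × Int) :=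
  (PySem.List.pyRange 0 vocab_size 1).map
    (fun i => (pvWord i, -(PySem.Int.floordiv (i - total_count) vocab_size)))

-- ===== PRECONDITION & SPEC =====
-- A raises ZeroDivisionError when vocab_size = 0; everywhere else it returns.
def Pre_create_uniform_distribution (vocab_size : Int) (total_count : Int) : Prop := vocab_size ≠ 0
instance (vocab_size : Int) (total_count : Int) : Decidable (Pre_create_uniform_distribution vocab_size total_count) := by unfold Pre_create_uniform_distribution; infer_instance
def pvWitness_create_uniform_distribution : Int × Int := (3, 7)

def Spec_create_uniform_distribution (vocab_size : Int) (total_count : Int) (out : List (String × Int)) : Prop := out = create_uniform_distribution_alt vocab_size total_count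
instance (vocab_size : Int) (total_count : Int) (out : List (String × Int)) : Decidable (Spec_create_uniform_distribution vocab_size total_count out) := by unfold Spec_create_uniform_distribution; infer_instance

-- ===== CLAIM (what is proved, stated in full; the proofs are below) =====
def Claim_equal_create_uniform_distribution : Prop := ∀ (vocab_size : Int) (total_count : Int), Dom_create_uniform_distribution vocab_size total_count → Pre_create_uniform_distribution vocab_size total_count → Spec_create_uniform_distribution vocab_size total_count (create_uniform_distribution vocab_size total_count)

-- ===== LEMMAS AND PROOFS =====

-- A's remainder loop, characterised: incrementing slots 0..r-1 of fs is mapIdx with a guard.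
theorem pv_loop_eq (r : Nat) (fs : List Int) (hr : r ≤ fs.length) :
    (PySem.List.pyRange 0 (r : Int) 1).foldl
        (fun fs i => fs.set i.toNat (PySem.List.pyGetD fs i 0 + 1)) fs
      = fs.mapIdx (fun j x => if j < r then x + 1 else x) := by
  induction r with
  | zero =>
    rw [show ((0 : Nat) : Int) = 0 from rfl, PySem.List.pyRange_one_eq_nil le_rfl]
    simp only [List.foldl_nil]
    apply List.ext_getElem (by simp)
    intro k h1 h2
    simp [List.getElem_mapIdx]
  | succ r ih =>
    rw [show ((r + 1 : Nat) : Int) = (r : Int) + 1 by push_cast; ring,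
        PySem.List.pyRange_one_succ_right (by positivity), List.foldl_append,
        ih (Nat.le_of_succ_le hr)]
    simp only [List.foldl_cons, List.foldl_nil]
    have hget : PySem.List.pyGetD (fs.mapIdx fun j x => if j < r then x + 1 else x) (r : Int) 0
        = fs[r]'hr := by
      rw [PySem.List.pyGetD_natCast, List.getD_eq_getElem _ _ (by simp; omega),
          List.getElem_mapIdx]
      simp
      rfl
    rw [hget]
    apply List.ext_getElem (by simp)
    intro k hk1 hk2
    have hk : k < fs.length := by simpa using hk2
    simp only [Int.toNat_natCast, List.getElem_set, List.getElem_mapIdx]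
    by_cases hkr : k = r <;> simp [hkr] <;> omega

-- the closed-form ceiling share equals floor share + remainder bump, for 0 ≤ k < v
theorem pv_share_eq (v t k : Int) (hv : 0 < v) (hk0 : 0 ≤ k) (hkv : k < v) :
    -(PySem.Int.floordiv (k - t) v)
      = (if k < PySem.Int.mod t v then PySem.Int.floordiv t v + 1 else PySem.Int.floordiv t v) := by
  have hqr := PySem.Int.floordiv_mul_add_mod t v
  have hr0 := PySem.Int.mod_nonneg t hv
  have hrv := PySem.Int.mod_lt t hv
  set q := PySem.Int.floordiv t v with hq
  set r := PySem.Int.mod t v with hrr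
  have : PySem.Int.floordiv (k - t) v = if k < r then -(q + 1) else -q := by
    split_ifs with h
    · rw [PySem.Int.floordiv_eq_iff_of_pos hv]
      constructor <;> nlinarith
    · rw [PySem.Int.floordiv_eq_iff_of_pos hv]
      constructor <;> nlinarith
  rw [this]
  split_ifs <;> ring

-- ===== VERDICT (by name: the statement is the Claim_ definition above) =====
theorem create_uniform_distribution_spec : Claim_equal_create_uniform_distribution := by
  intro v t _ hv
  unfold Spec_create_uniform_distribution create_uniform_distribution create_uniform_distribution_alt
  rcases lt_or_gt_of_ne hv with hneg | hpos
  · rw [PySem.List.pyRange_one_eq_nil (by omega)]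
    simp
  · -- positive vocab size
    have hr0 := PySem.Int.mod_nonneg t hpos
    have hrv := PySem.Int.mod_lt t hpos
    simp only [PySem.List.pyRepeat_singleton]
    rw [show PySem.Int.mod t v = ((PySem.Int.mod t v).toNat : Int) by omega,
        pv_loop_eq _ _ (by simp; omega)]
    apply List.ext_getElem (by simp [PySem.List.length_pyRange_one]; try omega)
    intro k hk1 hk2
    have hkv : (k : Int) < v := by
      have := hk2
      simp [PySem.List.length_pyRange_one] at this
      omega
    simp only [List.getElem_zip, List.getElem_map, List.getElem_mapIdx,
      PySem.List.getElem_pyRange_one, List.getElem_replicate, zero_add]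
    refine Prod.ext rfl ?_
    rw [pv_share_eq v t k hpos (by positivity) hkv]
    split_ifs with h1 h2 h2 <;> first | rfl | (exfalso; omega)
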